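-- pv_equiv track=rewrite | github.com/LeeSY99/algo-studyy | 프로그래머스/2/258711. 도넛과 막대 그래프/도넛과 막대 그래프.py | solution
-- ===== SOURCE A (Python) =====
-- from collections import defaultdict
--
-- def solution(edges):
--     indegree = defaultdict(int)
--     outdegree = defaultdict(int)
--     graph = defaultdict(list)
--     nodes = set()
--     for a,b in edges:
--         graph[a].append(b)
--         outdegree[a] += 1
--         indegree[b] += 1
--         nodes.add(a)
--         nodes.add(b)
--     for node in nodes:
--         if outdegree[node] >= 2 and indegree[node]==0:
--             start = node
--     donut, stick, eight = 0,0,0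
--
--     for s in graph[start]:
--         cur = s
--         visited = set()
--         while True:
--             if cur in visited:
--                 donut += 1
--                 break
--             visited.add(cur)
--
--             d = outdegree.get(cur,0)
--             if d == 0:
--                 stick += 1
--                 break
--             if d >= 2:
--                 eight += 1
--                 break
--
--             cur = graph[cur][0]
--     answer = [start, donut, stick, eight]
--     return answer
-- ===== SOURCE B (Python) =====
-- def solution(edges):
--     # Dict-free re-implementation: degrees and successors come from direct scans
--     # over the edge list (no defaultdicts, no adjacency lists, no node set), and a
--     # fuel-bounded walk replaces A's per-chain visited set (pigeonhole: more than
--     # 2*len(edges) out-degree-1 steps means the walk is inside a cycle = donut).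
--     heads = [a for a, b in edges]
--     tails = [b for a, b in edges]
--     root = next(a for a in heads
--                 if heads.count(a) >= 2 and tails.count(a) == 0)
--
--     def classify(cur, fuel):
--         while fuel > 0:
--             d = heads.count(cur)
--             if d == 0:
--                 return 1  # stick
--             if d >= 2:
--                 return 2  # eight
--             cur = next(b for a, b in edges if a == cur)
--             fuel -= 1
--         return 0  # never terminated: donut
--
--     fuel = 2 * len(edges) + 1
--     kinds = [classify(b, fuel) for a, b in edges if a == root]
--     return [root, kinds.count(0), kinds.count(1), kinds.count(2)]
-- ===== Notes on version B (the rewrite author's own statement) =====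
-- stated objective: alternative
-- what changed: B drops all of A's dictionaries: degrees and the unique successor are obtained by direct count/next scans over the edge list, the root is the first qualifying source, each root edge is classified by a fuel-bounded walk (pigeonhole replaces A's visited set) and the answer is three counts of the resulting kind list. Pre_ excludes inputs without a unique root node (indegree 0, outdegree >= 2): with none A raises UnboundLocalError, with several the returned root is an accident of set/dict iteration order.
-- outside the precondition, e.g. on solution([(1, 2), (1, 3), (4, 5), (4, 6)]): A returns [4, 0, 2, 0], B returns [1, 0, 2, 0]
import Mathlib
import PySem

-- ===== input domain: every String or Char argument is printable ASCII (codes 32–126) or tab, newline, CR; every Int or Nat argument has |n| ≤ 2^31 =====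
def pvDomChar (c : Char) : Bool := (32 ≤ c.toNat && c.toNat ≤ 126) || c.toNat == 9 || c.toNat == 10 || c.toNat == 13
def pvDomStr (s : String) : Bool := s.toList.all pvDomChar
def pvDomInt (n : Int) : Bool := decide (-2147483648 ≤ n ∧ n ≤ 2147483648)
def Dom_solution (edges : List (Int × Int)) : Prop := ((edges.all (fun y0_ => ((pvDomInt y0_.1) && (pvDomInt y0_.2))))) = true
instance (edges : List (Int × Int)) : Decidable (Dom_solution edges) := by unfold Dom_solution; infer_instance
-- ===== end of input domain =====

-- B is a dict-free re-implementation: degrees and successors by direct scans over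
-- the edge list, a fuel-bounded walk instead of a visited set (objective:
-- alternative algorithm, no speed claim). Return values only; no mutation.

-- ===== PORT A =====
-- A's 'while True' chain walk: each iteration either breaks or adds a fresh node to
-- 'visited' ⊆ nodes, so Python breaks within 2*len(edges) iterations; the fuel-0
-- default 0 (donut) is what Python returns on any walk that long (an out-degree-1
-- cycle). Returns 0 = donut, 1 = stick, 2 = eight.
def walkA (outd : PySem.Dict Int Int) (graph : PySem.Dict Int (List Int)) :
    Nat → PySem.Set Int → Int → Int
  | 0, _, _ => 0
  | fuel + 1, visited, cur =>
    if visited.contains cur then 0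
    else
      let visited := PySem.Set.add visited cur
      let d := outd.getD cur 0
      if d = 0 then 1
      else if 2 ≤ d then 2
      else
        -- graph[cur][0]: d = 1 guarantees the list is nonempty, so the .getD 0 of
        -- the pyGet? (IndexError = none) is never taken on an executed path
        walkA outd graph fuel visited ((PySem.List.pyGet? (graph.getD cur []) 0).getD 0)

def solution (edges : List (Int × Int)) : List Int :=
  -- one loop filling indegree, outdegree, graph (defaultdicts) and the node set
  let st := edges.foldl
    (fun (s : PySem.Dict Int Int × PySem.Dict Int Int × PySem.Dict Int (List Int) × PySem.Set Int) e =>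
      (s.1.modify e.2 0 (· + 1),
        (s.2.1.modify e.1 0 (· + 1),
          (s.2.2.1.modify e.1 [] (· ++ [e.2]),
            PySem.Set.add (PySem.Set.add s.2.2.2 e.1) e.2))))
    (PySem.Dict.empty, PySem.Dict.empty, PySem.Dict.empty, PySem.Set.empty)
  let indegree := st.1
  let outdegree := st.2.1
  let graph := st.2.2.1
  let nodes := st.2.2.2
  -- 'for node in nodes: if …: start = node' keeps the LAST match; under Pre_ there
  -- is exactly one match, so the (unmodelled) set iteration order cannot matter
  let start : Option Int := nodes.foldl
    (fun st node => if 2 ≤ outdegree.getD node 0 ∧ indegree.getD node 0 = 0 then some node else st)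
    none
  match start with
  | none => []   -- Python raises UnboundLocalError here; excluded by Pre_
  | some start =>
    let t := (graph.getD start []).foldl
      (fun (t : Int × Int × Int) s =>
        let k := walkA outdegree graph (2 * edges.length + 1) PySem.Set.empty s
        if k = 0 then (t.1 + 1, t.2.1, t.2.2)
        else if k = 1 then (t.1, t.2.1 + 1, t.2.2)
        else (t.1, t.2.1, t.2.2 + 1))
      (0, 0, 0)
    [start, t.1, t.2.1, t.2.2]

-- ===== PORT B =====
-- B's 'classify': count scans over the head list, fuel-bounded; 0 = donut (fuel
-- exhausted), 1 = stick, 2 = eight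
def walkB (edges : List (Int × Int)) : Nat → Int → Int
  | 0, _ => 0
  | fuel + 1, cur =>
    let d := (edges.map (·.1)).count cur
    if d = 0 then 1
    else if 2 ≤ d then 2
    -- next(b for a,b in edges if a == cur): d = 1 guarantees a match, so the
    -- .getD 0 of the find? (StopIteration = none) is never taken on an executed path
    else walkB edges fuel (((edges.find? (fun e => e.1 == cur)).map (·.2)).getD 0)

def solution_alt (edges : List (Int × Int)) : List Int :=
  let heads := edges.map (·.1)
  let tails := edges.map (·.2)
  -- next(a for a in heads if …): first qualifying source; StopIteration (none) is
  -- excluded by Pre_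
  match heads.find? (fun a => decide (2 ≤ heads.count a) && decide (tails.count a = 0)) with
  | none => []
  | some root =>
    let fuel := 2 * edges.length + 1
    let kinds := (edges.filter (fun e => e.1 == root)).map (fun e => walkB edges fuel e.2)
    [root, (kinds.count 0 : Int), (kinds.count 1 : Int), (kinds.count 2 : Int)]

-- ===== PRECONDITION & SPEC =====
-- the candidate roots: distinct sources with indegree 0 and outdegree >= 2
def rootsOf (edges : List (Int × Int)) : List Int :=
  (PySem.List.dedup (edges.map (·.1))).filter
    (fun x => decide (edges.countP (fun e => e.2 == x) = 0 ∧ 2 ≤ edges.countP (fun e => e.1 == x)))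

-- Pre_ excludes inputs without a unique root node (indegree 0, outdegree >= 2):
-- with none A raises UnboundLocalError, with several the returned root is an
-- accident of set/dict iteration order.
def Pre_solution (edges : List (Int × Int)) : Prop := (rootsOf edges).length = 1
instance (edges : List (Int × Int)) : Decidable (Pre_solution edges) := by unfold Pre_solution; infer_instance

def pvWitness_solution : (List (Int × Int)) := [(0, 1), (0, 2)]

def Spec_solution (edges : List (Int × Int)) (out : List Int) : Prop := out = solution_alt edges
instance (edges : List (Int × Int)) (out : List Int) : Decidable (Spec_solution edges out) := by unfold Spec_solution; infer_instance

-- ===== CLAIM (what is proved, stated in full; the proofs are below) =====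
def Claim_equal_solution : Prop := ∀ (edges : List (Int × Int)), Dom_solution edges → Pre_solution edges → Spec_solution edges (solution edges)

-- ===== LEMMAS AND PROOFS =====

-- once walkB enters a set of out-degree-1 nodes closed under the successor scan it
-- can only exhaust its fuel, i.e. report donut (0)
lemma walkB_trapped (edges : List (Int × Int)) (S : List Int)
    (hS : ∀ v ∈ S, (edges.map (·.1)).count v = 1 ∧
      (((edges.find? (fun e => e.1 == v)).map (·.2)).getD 0) ∈ S) :
    ∀ (fuel : Nat) (cur : Int), cur ∈ S → walkB edges fuel cur = 0 := by
  intro fuel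
  induction fuel with
  | zero => intro cur _; rfl
  | succ n ih =>
    intro cur hcur
    obtain ⟨h1, hstep⟩ := hS cur hcur
    simp only [walkB, h1]
    norm_num
    exact ih _ hstep

-- A's visited-set walk agrees with B's fuel-bounded count-scan walk, given that the
-- dict degree lookup equals the list count, the adjacency-list head equals the
-- find? successor, and the visited set is a chain of out-degree-1 nodes whose
-- successors stay in the set or are the current node
lemma walk_eq (edges : List (Int × Int)) (outA : PySem.Dict Int Int) (graphA : PySem.Dict Int (List Int))
    (hd : ∀ x, outA.getD x 0 = ((edges.map (·.1)).count x : Int))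
    (hs : ∀ x, (PySem.List.pyGet? (graphA.getD x []) 0).getD 0 =
      ((edges.find? (fun e => e.1 == x)).map (·.2)).getD 0) :
    ∀ (fuel : Nat) (visited : PySem.Set Int) (cur : Int),
      (∀ v ∈ visited, (outA.getD v 0 ≠ 0 ∧ ¬ (2 ≤ outA.getD v 0)) ∧
        ((PySem.List.pyGet? (graphA.getD v []) 0).getD 0 ∈ visited ∨
         (PySem.List.pyGet? (graphA.getD v []) 0).getD 0 = cur)) →
      walkA outA graphA fuel visited cur = walkB edges fuel cur := by
  intro fuel
  induction fuel with
  | zero => intro visited cur _; rfl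
  | succ n ih =>
    intro visited cur hinv
    by_cases hvc : PySem.Set.contains visited cur = true
    · have hmem : cur ∈ visited := (PySem.Set.contains_iff _ _).mp hvc
      have htrap : walkB edges (n + 1) cur = 0 := by
        refine walkB_trapped edges visited ?_ _ _ hmem
        intro v hv
        obtain ⟨⟨h0, h2⟩, hstep⟩ := hinv v hv
        rw [hd] at h0 h2
        have hcnt : (edges.map (·.1)).count v = 1 := by omega
        refine ⟨hcnt, ?_⟩
        rw [← hs]
        rcases hstep with h | h
        · exact h
        · rwa [h]
      simp only [walkA, hvc, if_true]
      exact htrap.symm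
    · simp only [walkA, hvc, Bool.false_eq_true, if_false]
      simp only [walkB]
      by_cases h0 : outA.getD cur 0 = 0
      · have : (edges.map (·.1)).count cur = 0 := by
          have := hd cur; omega
        simp [h0, this]
      · by_cases h2 : (2 : Int) ≤ outA.getD cur 0
        · have hc2 : 2 ≤ (edges.map (·.1)).count cur := by
            have := hd cur; omega
          have hc0 : ¬ (edges.map (·.1)).count cur = 0 := by omega
          simp [h0, h2, hc0, hc2]
        · have hc1 : (edges.map (·.1)).count cur = 1 := by
            have := hd cur; omega
          simp only [if_neg h0, if_neg h2, hc1]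
          norm_num
          rw [← hs cur]
          refine ih (PySem.Set.add visited cur) _ ?_
          intro v hv
          rcases (PySem.Set.mem_add _ _ _).mp hv with hv' | hv'
          · obtain ⟨hdok, hstep⟩ := hinv v hv'
            refine ⟨hdok, ?_⟩
            rcases hstep with h | h
            · exact Or.inl ((PySem.Set.mem_add _ _ _).mpr (Or.inl h))
            · exact Or.inl ((PySem.Set.mem_add _ _ _).mpr (Or.inr h))
          · subst hv'
            exact ⟨⟨h0, h2⟩, Or.inr rfl⟩

-- the one loop of A filling four independent structures is four loops
lemma foldA_split (edges : List (Int × Int)) :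
    ∀ (d1 d2 : PySem.Dict Int Int) (d3 : PySem.Dict Int (List Int)) (s : PySem.Set Int),
      edges.foldl
        (fun (s : PySem.Dict Int Int × PySem.Dict Int Int × PySem.Dict Int (List Int) × PySem.Set Int) e =>
          (s.1.modify e.2 0 (· + 1),
            (s.2.1.modify e.1 0 (· + 1),
              (s.2.2.1.modify e.1 [] (· ++ [e.2]),
                PySem.Set.add (PySem.Set.add s.2.2.2 e.1) e.2)))) (d1, d2, d3, s) =
      (edges.foldl (fun d e => d.modify e.2 0 (· + 1)) d1,
        edges.foldl (fun d e => d.modify e.1 0 (· + 1)) d2,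
        edges.foldl (fun d e => d.modify e.1 [] (· ++ [e.2])) d3,
        edges.foldl (fun s e => PySem.Set.add (PySem.Set.add s e.1) e.2) s) := by
  induction edges with
  | nil => intro d1 d2 d3 s; rfl
  | cons e rest ih => intro d1 d2 d3 s; simp only [List.foldl_cons]; exact ih _ _ _ _

-- a last-match scan over elements that can only match r, starting at (some r), stays (some r)
lemma foldl_lastMatch_keep {q : Int → Prop} [DecidablePred q] {r : Int} :
    ∀ (l : List Int), (∀ x ∈ l, q x → x = r) →
      l.foldl (fun st x => if q x then some x else st) (some r) = some r := by
  intro l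
  induction l with
  | nil => intro _; rfl
  | cons a t ih =>
    intro h
    simp only [List.foldl_cons]
    by_cases hqa : q a
    · rw [if_pos hqa, h a (by simp) hqa]
      exact ih (fun x hx => h x (by simp [hx]))
    · rw [if_neg hqa]
      exact ih (fun x hx => h x (by simp [hx]))

-- a last-match scan whose unique possible match r occurs returns (some r)
lemma foldl_lastMatch {q : Int → Prop} [DecidablePred q] {r : Int} :
    ∀ (l : List Int), (∀ x ∈ l, q x → x = r) → r ∈ l → q r →
      l.foldl (fun st x => if q x then some x else st) none = some r := by
  intro l
  induction l with
  | nil => intro _ h; exact absurd h (List.not_mem_nil)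
  | cons a t ih =>
    intro h hr hqr
    simp only [List.foldl_cons]
    by_cases hqa : q a
    · rw [if_pos hqa, h a (by simp) hqa]
      exact foldl_lastMatch_keep t (fun x hx => h x (by simp [hx]))
    · rw [if_neg hqa]
      have hrt : r ∈ t := by
        rcases List.mem_cons.mp hr with h' | h'
        · exact absurd (h' ▸ hqr) hqa
        · exact h'
      exact ih (fun x hx => h x (by simp [hx])) hrt hqr

-- find? over a list whose unique possible match r occurs returns (some r)
lemma find?_unique {p : Int → Bool} {r : Int} :
    ∀ (l : List Int), (∀ x ∈ l, p x = true → x = r) → r ∈ l → p r = true →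
      l.find? p = some r := by
  intro l
  induction l with
  | nil => intro _ h; exact absurd h (List.not_mem_nil)
  | cons a t ih =>
    intro h hr hpr
    by_cases hpa : p a = true
    · rw [List.find?_cons_of_pos hpa, h a (by simp) hpa]
    · rw [List.find?_cons_of_neg (by simpa using hpa)]
      have hrt : r ∈ t := by
        rcases List.mem_cons.mp hr with h' | h'
        · exact absurd (h' ▸ hpr) hpa
        · exact h'
      exact ih (fun x hx => h x (by simp [hx])) hrt hpr

-- membership in A's node set
lemma mem_nodes_fold (edges : List (Int × Int)) (x : Int) :
    ∀ (s : PySem.Set Int),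
      (x ∈ edges.foldl (fun s e => PySem.Set.add (PySem.Set.add s e.1) e.2) s ↔
        x ∈ s ∨ ∃ e ∈ edges, x = e.1 ∨ x = e.2) := by
  induction edges with
  | nil => intro s; simp
  | cons e rest ih =>
    intro s
    simp only [List.foldl_cons]
    rw [ih]
    simp only [PySem.Set.mem_add, List.mem_cons]
    constructor
    · rintro (((h | h) | h) | ⟨e', he', hx⟩)
      · exact Or.inl h
      · exact Or.inr ⟨e, Or.inl rfl, Or.inl h⟩
      · exact Or.inr ⟨e, Or.inl rfl, Or.inr h⟩
      · exact Or.inr ⟨e', Or.inr he', hx⟩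
    · rintro (h | ⟨e', he' | he', hx⟩)
      · exact Or.inl (Or.inl (Or.inl h))
      · subst he'
        rcases hx with hx | hx
        · exact Or.inl (Or.inl (Or.inr hx))
        · exact Or.inl (Or.inr hx)
      · exact Or.inr ⟨e', he', hx⟩

-- Python's L[0] at index 0 is head?
lemma pyGet?_zero (L : List Int) : PySem.List.pyGet? L 0 = L.head? := by
  cases L <;> simp [PySem.List.pyGet?, PySem.List.pyIdx?]

-- count over a mapped list as countP over the original
lemma count_map_fst (edges : List (Int × Int)) (x : Int) :
    (edges.map (fun e => e.1)).count x = edges.countP (fun e => e.1 == x) := by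
  induction edges with
  | nil => rfl
  | cons e rest ih => simp [List.count_cons, List.countP_cons, ih]

lemma count_map_snd (edges : List (Int × Int)) (x : Int) :
    (edges.map (fun e => e.2)).count x = edges.countP (fun e => e.2 == x) := by
  induction edges with
  | nil => rfl
  | cons e rest ih => simp [List.count_cons, List.countP_cons, ih]

-- find? is the head of the filtered list
lemma find?_eq_head_filter {α : Type} (p : α → Bool) (l : List α) :
    l.find? p = (l.filter p).head? := by
  induction l with
  | nil => rfl
  | cons e rest ih =>
    cases h : p e
    · rw [List.find?_cons_of_neg (by simp [h]), List.filter_cons_of_neg (by simp [h]), ih]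
    · rw [List.find?_cons_of_pos h, List.filter_cons_of_pos h, List.head?_cons]

-- walkB only returns 0, 1 or 2
lemma walkB_range (edges : List (Int × Int)) :
    ∀ (fuel : Nat) (cur : Int), walkB edges fuel cur = 0 ∨ walkB edges fuel cur = 1 ∨ walkB edges fuel cur = 2 := by
  intro fuel
  induction fuel with
  | zero => intro cur; exact Or.inl rfl
  | succ n ih =>
    intro cur
    simp only [walkB]
    split_ifs with h0 h2
    · exact Or.inr (Or.inl rfl)
    · exact Or.inr (Or.inr rfl)
    · exact ih _

-- A's classification fold over a list of kinds in {0,1,2} is three counts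
lemma foldl_classify_counts :
    ∀ (ks : List Int) (a b c : Int), (∀ k ∈ ks, k = 0 ∨ k = 1 ∨ k = 2) →
      ks.foldl
        (fun (t : Int × Int × Int) k =>
          if k = 0 then (t.1 + 1, t.2.1, t.2.2)
          else if k = 1 then (t.1, t.2.1 + 1, t.2.2)
          else (t.1, t.2.1, t.2.2 + 1)) (a, b, c) =
      (a + (ks.count 0 : Int), b + (ks.count 1 : Int), c + (ks.count 2 : Int)) := by
  intro ks
  induction ks with
  | nil => intro a b c _; simp
  | cons k t ih =>
    intro a b c h
    have hk := h k (by simp)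
    have ht : ∀ k ∈ t, k = 0 ∨ k = 1 ∨ k = 2 := fun x hx => h x (by simp [hx])
    simp only [List.foldl_cons, List.count_cons]
    rcases hk with hk | hk | hk <;> subst hk <;> simp [ih _ _ _ ht] <;> ring

-- ===== VERDICT (by name: the statement is the Claim_ definition above) =====
theorem solution_spec : Claim_equal_solution := by
  intro edges _hdom hpre
  show solution edges = solution_alt edges
  obtain ⟨r, hr⟩ : ∃ r, rootsOf edges = [r] := List.length_eq_one_iff.mp hpre
  -- characterise the structures A builds
  have hOutA : ∀ x, (edges.foldl (fun (d : PySem.Dict Int Int) (e : Int × Int) => d.modify e.1 0 (· + 1)) PySem.Dict.empty).getD x 0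
      = ((edges.map (fun e => e.1)).count x : Int) := by
    intro x
    rw [← List.foldl_map (f := fun e : Int × Int => e.1) (g := fun d x => PySem.Dict.modify d x 0 (· + 1))]
    rw [PySem.Dict.getD_foldl_modify_add_one]
    simp
  have hIndA : ∀ x, (edges.foldl (fun (d : PySem.Dict Int Int) (e : Int × Int) => d.modify e.2 0 (· + 1)) PySem.Dict.empty).getD x 0
      = ((edges.map (fun e => e.2)).count x : Int) := by
    intro x
    rw [← List.foldl_map (f := fun e : Int × Int => e.2) (g := fun d x => PySem.Dict.modify d x 0 (· + 1))]
    rw [PySem.Dict.getD_foldl_modify_add_one]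
    simp
  have hGraph : ∀ c, (edges.foldl (fun (d : PySem.Dict Int (List Int)) (e : Int × Int) => d.modify e.1 [] (· ++ [e.2])) PySem.Dict.empty).getD c []
      = (edges.filter (fun e => e.1 == c)).map (·.2) := by
    intro c
    rw [PySem.Dict.getD_foldl_modify_append]
    simp
  -- membership characterisation of rootsOf
  have hmemRoots : ∀ x, x ∈ rootsOf edges ↔
      (x ∈ edges.map (fun e => e.1) ∧ edges.countP (fun e => e.2 == x) = 0 ∧ 2 ≤ edges.countP (fun e => e.1 == x)) := by
    intro x
    unfold rootsOf
    simp [List.mem_filter]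
  have hrP : edges.countP (fun e => e.2 == r) = 0 ∧ 2 ≤ edges.countP (fun e => e.1 == r) :=
    ((hmemRoots r).mp (by rw [hr]; simp)).2
  have hrSrc : r ∈ edges.map (fun e => e.1) :=
    ((hmemRoots r).mp (by rw [hr]; simp)).1
  have huniq : ∀ x, x ∈ edges.map (fun e => e.1) →
      edges.countP (fun e => e.2 == x) = 0 → 2 ≤ edges.countP (fun e => e.1 == x) → x = r := by
    intro x hx h1 h2
    have : x ∈ rootsOf edges := (hmemRoots x).mpr ⟨hx, h1, h2⟩
    rw [hr] at this
    simpa using this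
  -- unfold the two programs
  simp only [solution, solution_alt]
  rw [foldA_split]
  dsimp only
  -- A picks the unique root r
  have hstartA :
      (edges.foldl (fun s e => PySem.Set.add (PySem.Set.add s e.1) e.2) PySem.Set.empty).foldl
        (fun st node =>
          if 2 ≤ (edges.foldl (fun (d : PySem.Dict Int Int) (e : Int × Int) => d.modify e.1 0 (· + 1)) PySem.Dict.empty).getD node 0 ∧
              (edges.foldl (fun (d : PySem.Dict Int Int) (e : Int × Int) => d.modify e.2 0 (· + 1)) PySem.Dict.empty).getD node 0 = 0
          then some node else st) none = some r := by
    apply foldl_lastMatch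
    · intro x _ hq
      obtain ⟨hq2, hq0⟩ := hq
      simp only [hOutA, count_map_fst] at hq2
      simp only [hIndA, count_map_snd] at hq0
      have hq2' : 2 ≤ edges.countP (fun e => e.1 == x) := by exact_mod_cast hq2
      have hq0' : edges.countP (fun e => e.2 == x) = 0 := by exact_mod_cast hq0
      have hxmem : x ∈ edges.map (fun e => e.1) := by
        rw [← count_map_fst] at hq2'
        exact List.count_pos_iff.mp (by omega)
      exact huniq x hxmem hq0' hq2'
    · rw [mem_nodes_fold]
      obtain ⟨e, he, hre⟩ := List.mem_map.mp hrSrc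
      exact Or.inr ⟨e, he, Or.inl hre.symm⟩
    · constructor
      · simp only [hOutA, count_map_fst]; exact_mod_cast hrP.2
      · simp only [hIndA, count_map_snd]; exact_mod_cast hrP.1
  -- B picks the unique root r (first match over the head list)
  have hrootB :
      (edges.map (·.1)).find?
        (fun a => decide (2 ≤ (edges.map (·.1)).count a) && decide ((edges.map (·.2)).count a = 0)) = some r := by
    apply find?_unique
    · intro x _ hp
      rw [Bool.and_eq_true, decide_eq_true_eq, decide_eq_true_eq] at hp
      obtain ⟨hq2, hq0⟩ := hp
      rw [count_map_fst] at hq2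
      rw [count_map_snd] at hq0
      have hxmem : x ∈ edges.map (fun e => e.1) := by
        rw [← count_map_fst] at hq2
        exact List.count_pos_iff.mp (by omega)
      exact huniq x hxmem hq0 hq2
    · exact hrSrc
    · rw [Bool.and_eq_true, decide_eq_true_eq, decide_eq_true_eq, count_map_fst, count_map_snd]
      exact ⟨hrP.2, hrP.1⟩
  rw [hstartA, hrootB]
  dsimp only
  -- the two chain walks agree on every start node
  have hwalk : ∀ s,
      walkA (edges.foldl (fun (d : PySem.Dict Int Int) (e : Int × Int) => d.modify e.1 0 (· + 1)) PySem.Dict.empty)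
        (edges.foldl (fun (d : PySem.Dict Int (List Int)) (e : Int × Int) => d.modify e.1 [] (· ++ [e.2])) PySem.Dict.empty)
        (2 * edges.length + 1) PySem.Set.empty s =
      walkB edges (2 * edges.length + 1) s := by
    intro s
    apply walk_eq
    · intro x; simp only [hOutA]
    · intro x
      simp only [hGraph, pyGet?_zero, find?_eq_head_filter]  -- find? = head of filter
      cases (edges.filter (fun e => e.1 == x)) <;> simp
    · intro v hv; cases hv
  -- the classification loop of A counts exactly B's kind list
  rw [hGraph r]
  have hmapfold :
      ((edges.filter (fun e => e.1 == r)).map (·.2)).foldl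
        (fun (t : Int × Int × Int) s =>
          let k := walkA (edges.foldl (fun (d : PySem.Dict Int Int) (e : Int × Int) => d.modify e.1 0 (· + 1)) PySem.Dict.empty)
            (edges.foldl (fun (d : PySem.Dict Int (List Int)) (e : Int × Int) => d.modify e.1 [] (· ++ [e.2])) PySem.Dict.empty)
            (2 * edges.length + 1) PySem.Set.empty s
          if k = 0 then (t.1 + 1, t.2.1, t.2.2)
          else if k = 1 then (t.1, t.2.1 + 1, t.2.2)
          else (t.1, t.2.1, t.2.2 + 1)) ((0 : Int), (0 : Int), (0 : Int)) =
      ((edges.filter (fun e => e.1 == r)).map (fun e => walkB edges (2 * edges.length + 1) e.2)).foldl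
        (fun (t : Int × Int × Int) k =>
          if k = 0 then (t.1 + 1, t.2.1, t.2.2)
          else if k = 1 then (t.1, t.2.1 + 1, t.2.2)
          else (t.1, t.2.1, t.2.2 + 1)) ((0 : Int), (0 : Int), (0 : Int)) := by
    rw [List.foldl_map, List.foldl_map]
    apply PySem.List.foldl_congr_mem
    intro acc x _
    simp only [hwalk]
  rw [hmapfold]
  rw [foldl_classify_counts _ _ _ _
    (by intro k hk; obtain ⟨e, _, hke⟩ := List.mem_map.mp hk; exact hke ▸ walkB_range edges _ _)]
  simp
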